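-- pv_equiv track=rewrite | github.com/stanly363/TSP-Quantum-Encryption | main.py | tour_decode
-- ===== SOURCE A (Python) =====
-- def tour_decode(tour_output, tour):
--     bits = ''
--     idx = 0
--     for curr, nxt in tour_output:
--         expected = tour[(idx + 1) % len(tour)]
--         bits += '0' if nxt == expected else '1'
--         idx += 1
--     chars = [chr(int(bits[i:i+8], 2)) for i in range(0, len(bits), 8)]
--     return ''.join(chars)
-- ===== SOURCE B (Python) =====
-- def tour_decode(tour_output, tour):
--     out = []
--     acc = 0
--     count = 0
--     idx = 0
--     for curr, nxt in tour_output: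
--         expected = tour[(idx + 1) % len(tour)]
--         acc = acc * 2 + (0 if nxt == expected else 1)
--         count += 1
--         if count == 8:
--             out.append(chr(acc))
--             acc = 0
--             count = 0
--         idx += 1
--     if count > 0:
--         out.append(chr(acc))
--     return ''.join(out)
-- ===== Notes on version B (the rewrite author's own statement) =====
-- stated objective: alternative
-- what changed: A builds an intermediate bit string and then converts it chunk-by-chunk with slicing and int(bits[i:i+8],2); B is a single streaming pass over tour_output that keeps an integer accumulator and bit count, emitting a character every 8 bits (and one for a trailing partial byte), with no intermediate bit string.
import Mathlib
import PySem

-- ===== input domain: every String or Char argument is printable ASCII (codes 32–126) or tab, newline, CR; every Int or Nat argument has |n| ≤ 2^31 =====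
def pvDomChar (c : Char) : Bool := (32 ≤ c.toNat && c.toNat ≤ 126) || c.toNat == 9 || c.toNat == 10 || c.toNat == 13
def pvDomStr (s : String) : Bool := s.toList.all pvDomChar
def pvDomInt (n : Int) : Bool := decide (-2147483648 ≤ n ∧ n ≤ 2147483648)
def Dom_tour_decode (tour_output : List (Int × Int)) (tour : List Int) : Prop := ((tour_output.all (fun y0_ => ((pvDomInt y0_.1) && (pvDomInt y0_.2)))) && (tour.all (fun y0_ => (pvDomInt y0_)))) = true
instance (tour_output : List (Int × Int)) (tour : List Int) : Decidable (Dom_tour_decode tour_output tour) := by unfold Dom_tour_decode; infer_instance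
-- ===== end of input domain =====

-- B fuses A's two phases (build a bit string, then chunk it into bytes) into one
-- streaming pass with an accumulator; same output, no intermediate bit string (objective: alternative).

-- ===== PORT A =====
-- int(s, 2): exact for the nonempty '0'/'1' strings A ever passes to it
def pvBinVal (s : List Char) : Nat :=
  s.foldl (fun a c => a * 2 + (if c = '1' then 1 else 0)) 0

def tour_decode (tour_output : List (Int × Int)) (tour : List Int) : String :=
  let st := tour_output.foldl
    (fun (st : List Char × Int) p =>
      let expected := (PySem.List.pyGet? tour (PySem.Int.mod (st.2 + 1) (tour.length : Int))).getD 0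
      (st.1 ++ [if p.2 = expected then '0' else '1'], st.2 + 1))
    ([], 0)
  let bits := st.1
  let chars := (PySem.List.pyRange 0 (bits.length : Int) 8).map
      (fun i => Char.ofNat (pvBinVal (PySem.List.slice bits (some i) (some (i + 8)))))
  String.ofList chars

-- ===== PORT B =====
-- state: (out, acc, count, idx), exactly Source B's loop
def tour_decode_alt (tour_output : List (Int × Int)) (tour : List Int) : String :=
  let st := tour_output.foldl
    (fun (st : List Char × Nat × Nat × Int) p =>
      let expected := (PySem.List.pyGet? tour (PySem.Int.mod (st.2.2.2 + 1) (tour.length : Int))).getD 0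
      let acc := st.2.1 * 2 + (if p.2 = expected then 0 else 1)
      let count := st.2.2.1 + 1
      if count = 8 then (st.1 ++ [Char.ofNat acc], 0, 0, st.2.2.2 + 1)
      else (st.1, acc, count, st.2.2.2 + 1))
    ([], 0, 0, 0)
  String.ofList (if st.2.2.1 > 0 then st.1 ++ [Char.ofNat st.2.1] else st.1)

-- ===== PRECONDITION & SPEC =====
-- Pre_ excludes only inputs where A raises: tour = [] with a nonempty tour_output
-- makes '(idx + 1) % len(tour)' a ZeroDivisionError.
def Pre_tour_decode (tour_output : List (Int × Int)) (tour : List Int) : Prop :=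
  tour_output = [] ∨ tour ≠ []
instance (tour_output : List (Int × Int)) (tour : List Int) : Decidable (Pre_tour_decode tour_output tour) := by unfold Pre_tour_decode; infer_instance

def pvWitness_tour_decode : (List (Int × Int)) × List Int :=
  ([(0, 1), (1, 0), (0, 2)], [0, 1, 2])

def Spec_tour_decode (tour_output : List (Int × Int)) (tour : List Int) (out : String) : Prop := out = tour_decode_alt tour_output tour
instance (tour_output : List (Int × Int)) (tour : List Int) (out : String) : Decidable (Spec_tour_decode tour_output tour out) := by unfold Spec_tour_decode; infer_instance

-- ===== CLAIM (what is proved, stated in full; the proofs are below) =====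
def Claim_equal_tour_decode : Prop := ∀ (tour_output : List (Int × Int)) (tour : List Int), Dom_tour_decode tour_output tour → Pre_tour_decode tour_output tour → Spec_tour_decode tour_output tour (tour_decode tour_output tour)

-- ===== LEMMAS AND PROOFS =====

-- the bit character produced at step idx (shared characterisation of both loops)
def pvBitsFrom (tour : List Int) (idx : Int) : List (Int × Int) → List Char
  | [] => []
  | p :: rest =>
      (if p.2 = (PySem.List.pyGet? tour (PySem.Int.mod (idx + 1) (tour.length : Int))).getD 0
        then '0' else '1') :: pvBitsFrom tour (idx + 1) rest

-- A's chunked byte conversion, recursively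
def pvChunks : List Char → List Char
  | [] => []
  | c :: cs => Char.ofNat (pvBinVal ((c :: cs).take 8)) :: pvChunks ((c :: cs).drop 8)
termination_by l => l.length
decreasing_by simp

-- B's streaming conversion, abstracted over the bit list
def pvStream : List Char → Nat → Nat → List Char → List Char
  | [], acc, count, out => if count > 0 then out ++ [Char.ofNat acc] else out
  | c :: cs, acc, count, out =>
      let acc' := acc * 2 + (if c = '1' then 1 else 0)
      if count + 1 = 8 then pvStream cs 0 0 (out ++ [Char.ofNat acc'])
      else pvStream cs acc' (count + 1) out

theorem pvBinVal_append_singleton (p : List Char) (c : Char) :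
    pvBinVal (p ++ [c]) = pvBinVal p * 2 + (if c = '1' then 1 else 0) := by
  simp [pvBinVal]

theorem pvBinVal_nil : pvBinVal [] = 0 := rfl

theorem pvChunks_nil : pvChunks [] = [] := by unfold pvChunks; rfl

theorem pvChunks_cons (c : Char) (cs : List Char) :
    pvChunks (c :: cs)
      = Char.ofNat (pvBinVal ((c :: cs).take 8)) :: pvChunks ((c :: cs).drop 8) := by
  conv_lhs => unfold pvChunks

theorem foldA_eq (tour : List Int) (tos : List (Int × Int)) :
    ∀ (bits : List Char) (idx : Int),
      tos.foldl
        (fun (st : List Char × Int) p =>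
          let expected := (PySem.List.pyGet? tour (PySem.Int.mod (st.2 + 1) (tour.length : Int))).getD 0
          (st.1 ++ [if p.2 = expected then '0' else '1'], st.2 + 1))
        (bits, idx)
      = (bits ++ pvBitsFrom tour idx tos, idx + tos.length) := by
  induction tos with
  | nil => intro bits idx; simp [pvBitsFrom]
  | cons p rest ih =>
      intro bits idx
      simp only [List.foldl_cons, ih, pvBitsFrom, Prod.mk.injEq]
      refine ⟨by simp, by simp [List.length_cons]; ring⟩

theorem foldB_eq (tour : List Int) (tos : List (Int × Int)) :
    ∀ (out : List Char) (acc count : Nat) (idx : Int),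
      (let st := tos.foldl
        (fun (st : List Char × Nat × Nat × Int) p =>
          let expected := (PySem.List.pyGet? tour (PySem.Int.mod (st.2.2.2 + 1) (tour.length : Int))).getD 0
          let acc := st.2.1 * 2 + (if p.2 = expected then 0 else 1)
          let count := st.2.2.1 + 1
          if count = 8 then (st.1 ++ [Char.ofNat acc], 0, 0, st.2.2.2 + 1)
          else (st.1, acc, count, st.2.2.2 + 1))
        (out, acc, count, idx)
       if st.2.2.1 > 0 then st.1 ++ [Char.ofNat st.2.1] else st.1)
      = pvStream (pvBitsFrom tour idx tos) acc count out := by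
  induction tos with
  | nil => intro out acc count idx; simp [pvBitsFrom, pvStream]
  | cons p rest ih =>
      intro out acc count idx
      by_cases hb : p.2 = (PySem.List.pyGet? tour (PySem.Int.mod (idx + 1) (tour.length : Int))).getD 0
      · by_cases hc : count + 1 = 8
        · simp only [List.foldl_cons, pvBitsFrom, if_pos hb, if_pos hc]
          rw [ih]; simp only [pvStream]; simp [hc]
        · simp only [List.foldl_cons, pvBitsFrom, if_pos hb, if_neg hc]
          rw [ih]; simp only [pvStream]; simp [hc]
      · by_cases hc : count + 1 = 8
        · simp only [List.foldl_cons, pvBitsFrom, if_neg hb, if_pos hc]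
          rw [ih]; simp only [pvStream]; simp [hc]
        · simp only [List.foldl_cons, pvBitsFrom, if_neg hb, if_neg hc]
          rw [ih]; simp only [pvStream]; simp [hc]

theorem pvStream_eq_chunks (bs : List Char) :
    ∀ (p out : List Char), p.length < 8 →
      pvStream bs (pvBinVal p) p.length out = out ++ pvChunks (p ++ bs) := by
  induction bs with
  | nil =>
      intro p out hp
      cases p with
      | nil => simp [pvStream, pvChunks_nil]
      | cons c cs =>
          simp only [pvStream, List.append_nil]
          rw [pvChunks_cons]
          have h1 : (c :: cs).take 8 = c :: cs := List.take_of_length_le (by simpa using hp.le)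
          have h2 : (c :: cs).drop 8 = [] := List.drop_of_length_le (by simpa using hp.le)
          simp [h1, h2, pvChunks_nil]
  | cons b bs' ih =>
      intro p out hp
      simp only [pvStream]
      rw [← pvBinVal_append_singleton]
      by_cases hc : p.length + 1 = 8
      · rw [if_pos hc]
        have := ih [] (out ++ [Char.ofNat (pvBinVal (p ++ [b]))]) (by simp)
        simp only [pvBinVal_nil, List.length_nil, List.nil_append] at this
        rw [this]
        have hne : p ++ b :: bs' ≠ [] := by simp
        have hsplit : p ++ b :: bs' = (p ++ [b]) ++ bs' := by simp
        rw [hsplit]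
        obtain ⟨c, cs, hcs⟩ : ∃ c cs, (p ++ [b]) ++ bs' = c :: cs := by
          cases h : (p ++ [b]) ++ bs' with
          | nil => exact absurd h (by simp)
          | cons c cs => exact ⟨c, cs, rfl⟩
        rw [hcs, pvChunks_cons c cs, ← hcs]
        have hlen : (p ++ [b]).length = 8 := by simp; omega
        have ht : ((p ++ [b]) ++ bs').take 8 = p ++ [b] := by
          rw [← hlen]; exact List.take_left
        have hd : ((p ++ [b]) ++ bs').drop 8 = bs' := by
          rw [← hlen]; exact List.drop_left
        rw [ht, hd]
        simp
      · rw [if_neg hc]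
        have hlen : (p ++ [b]).length = p.length + 1 := by simp
        have := ih (p ++ [b]) out (by omega)
        rw [hlen] at this
        rw [this]
        simp


theorem map_range_chunks (bs : List Char) :
    (List.range ((bs.length + 7) / 8)).map
      (fun k => Char.ofNat (pvBinVal ((bs.drop (8 * k)).take 8))) = pvChunks bs := by
  induction hn : bs.length using Nat.strong_induction_on generalizing bs with
  | _ n ih =>
    cases bs with
    | nil => subst hn; simp [pvChunks_nil]
    | cons c cs =>
      subst hn
      have hm : ((c :: cs).length + 7) / 8 = (((c :: cs).drop 8).length + 7) / 8 + 1 := by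
        simp [List.length_drop, List.length_cons]; omega
      rw [hm, List.range_succ_eq_map, List.map_cons, List.map_map]
      rw [pvChunks_cons]
      congr 1
      rw [← ih (((c :: cs).drop 8).length) (by simp [List.length_drop]) _ rfl]
      apply List.map_congr_left
      intro k _
      simp only [Function.comp, List.drop_drop, Nat.mul_succ, Nat.add_comm]

theorem chunksA_eq (bs : List Char) :
    (PySem.List.pyRange 0 (bs.length : Int) 8).map
      (fun i => Char.ofNat (pvBinVal (PySem.List.slice bs (some i) (some (i + 8)))))
      = pvChunks bs := by
  rw [PySem.List.pyRange_of_pos 0 (bs.length : Int) (by norm_num)]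
  have hcnt : (if (0:Int) < (bs.length : Int) then ((((bs.length : Int)) - 0 + 8 - 1) / 8).toNat else 0)
      = (bs.length + 7) / 8 := by
    split <;> omega
  rw [hcnt, List.map_map, ← map_range_chunks bs]
  apply List.map_congr_left
  intro k _
  simp only [Function.comp]
  congr 1
  have h8 : (0 : Int) + 8 * (k : Int) = ((8 * k : Nat) : Int) := by push_cast; ring
  have h8' : (0 : Int) + 8 * (k : Int) + 8 = ((8 * k : Nat) : Int) + ((8 : Nat) : Int) := by
    push_cast; ring
  rw [h8', h8, PySem.List.slice_natCast_add]

-- ===== VERDICT (by name: the statement is the Claim_ definition above) =====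
theorem tour_decode_spec : Claim_equal_tour_decode := by
  intro tos tour _ _
  unfold Spec_tour_decode tour_decode tour_decode_alt
  rw [foldA_eq tour tos [] 0]
  have hB := foldB_eq tour tos [] 0 0 0
  simp only [] at hB ⊢
  rw [hB]
  have hS := pvStream_eq_chunks (pvBitsFrom tour 0 tos) [] [] (by simp)
  simp only [pvBinVal_nil, List.length_nil, List.nil_append] at hS
  rw [hS]
  congr 1
  simp only [List.nil_append]
  exact chunksA_eq (pvBitsFrom tour 0 tos)
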